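-- pv_equiv track=rewrite | github.com/KDE/pology | pology/comments.py | parse_field_values
-- ===== SOURCE A (Python) =====
-- def parse_field_values (comments, field):
--     """
--     Extract values of a field embedded in comments.
--
--     And embedded field is of the form::
--
--         <field>: <value> ### sub-comment
--
--     There may be several fields of the same name, thus the values are
--     returned in a list (empty if there were no appearances of the field).
--     Values are stripped of leading and trailing whitespace.
--
--     @param comments: comments to parse
--     @type comments: sequence of strings
--     @param field: field name
--     @type field: string
--
--     @returns: parsed values
--     @rtype: list of strings
--     """
--
--     values = []
--     for cmnt in comments:
--         cmnt = cmnt.strip()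
--         p = cmnt.find("###")
--         if p >= 0:
--             cmnt = cmnt[:p]
--         if cmnt.startswith(field):
--             p = cmnt.find(field) + len(field)
--             while p < len(cmnt) and cmnt[p].isspace():
--                 p += 1
--             if p == len(cmnt) or cmnt[p] != ":":
--                 continue
--             values.append(cmnt[p + 1:].strip())
--
--     return values
-- ===== SOURCE B (Python) =====
-- def parse_field_values(comments, field):
--     # Two-pointer scan: each candidate line is matched against the single
--     # pattern field + ":" , advancing one pointer through the line and one
--     # through the pattern, with whitespace in the line skippable exactly at
--     # the pattern position between the field name and the colon.
--     pat = field + ":"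
--     fl = len(field)
--
--     def match(body):
--         i = j = 0
--         while i < len(body):
--             if j < len(pat) and body[i] == pat[j]:
--                 i += 1
--                 j += 1
--                 if j == len(pat):
--                     return body[i:].strip()
--             elif j == fl and body[i].isspace():
--                 i += 1
--             else:
--                 return None
--         return None
--
--     values = []
--     for raw in comments:
--         v = match(raw.strip().split("###", 1)[0])
--         if v is not None:
--             values.append(v)
--     return values
-- ===== Notes on version B (the rewrite author's own statement) =====
-- stated objective: alternative
-- what changed: Replaces A's staged per-line processing (startswith prefix test, find+len index arithmetic, then a separate whitespace-skipping while loop, then a colon test) by a single fused two-pointer scan that matches each line against the one pattern field+':' , where whitespace in the line is consumable only at the pattern position between field and colon.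
import Mathlib
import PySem

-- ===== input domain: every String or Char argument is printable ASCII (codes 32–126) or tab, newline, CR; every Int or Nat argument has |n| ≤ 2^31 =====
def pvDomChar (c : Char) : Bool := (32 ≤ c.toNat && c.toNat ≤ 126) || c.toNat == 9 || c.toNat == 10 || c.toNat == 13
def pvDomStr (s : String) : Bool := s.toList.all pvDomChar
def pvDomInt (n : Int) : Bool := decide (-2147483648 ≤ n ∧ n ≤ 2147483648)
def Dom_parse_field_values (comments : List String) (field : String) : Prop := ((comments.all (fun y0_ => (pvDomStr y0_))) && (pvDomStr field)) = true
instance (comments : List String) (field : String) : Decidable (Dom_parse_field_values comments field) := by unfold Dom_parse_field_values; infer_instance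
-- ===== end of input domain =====

-- B replaces A's staged per-line processing (startswith, find+len index arithmetic,
-- a separate whitespace-skipping while loop, a colon test) by one fused two-pointer
-- scan of the line against the single pattern field+':'; same cost, equivalence proved
-- on all inputs.

-- ===== PORT A =====
-- A's `while p < len(cmnt) and cmnt[p].isspace(): p += 1` loop, on an Int index
def aSkipWs (cs : List Char) (p : Int) : Int :=
  if p < (cs.length : Int) then
    match PySem.List.pyGet? cs p with
    | some c => if PySem.Chars.isspace c then aSkipWs cs (p + 1) else p
    | none => p   -- unreachable in A: the loop index starts at find+len(field) ≥ 0
  else p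
termination_by ((cs.length : Int) - p).toNat
decreasing_by omega

-- body of A's `for cmnt in comments` loop
def parseFieldStep (field : List Char) (values : List String) (cmnt : String) : List String :=
  let cs := PySem.Chars.strip cmnt.toList
  let p := PySem.Chars.find cs "###".toList
  let cs := if p ≥ 0 then PySem.List.slice cs none (some p) else cs
  if PySem.Chars.startswith cs field then
    let q := PySem.Chars.find cs field + (field.length : Int)
    let q := aSkipWs cs q
    if q = (cs.length : Int) then values            -- continue
    else if PySem.List.pyGet? cs q ≠ some ':' then values   -- continue
    else values ++ [String.ofList (PySem.Chars.strip (PySem.List.slice cs (some (q + 1)) none))]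
  else values

def parse_field_values (comments : List String) (field : String) : List String :=
  comments.foldl (parseFieldStep field.toList) []

-- ===== PORT B =====
-- Source B's inner `while` loop of `match`: two pointers i (body) and j (pat = field+":")
def bMatch (pat : List Char) (fl : Nat) (body : List Char) (i j : Nat) : Option (List Char) :=
  if _h : i < body.length then
    if j < pat.length ∧ body.getD i ' ' = pat.getD j ' ' then
      if j + 1 = pat.length then some (PySem.Chars.strip (body.drop (i + 1)))
      else bMatch pat fl body (i + 1) (j + 1)
    else if j = fl ∧ PySem.Chars.isspace (body.getD i ' ') then
      bMatch pat fl body (i + 1) j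
    else none
  else none
termination_by body.length - i

-- `raw.strip().split("###", 1)[0]`: the head of a max-1 split is the part before the
-- first occurrence of "###" (the whole string if absent) — ported via find, exact here
def bHead (raw : String) : List Char :=
  let s := PySem.Chars.strip raw.toList
  let p := PySem.Chars.find s "###".toList
  if p ≥ 0 then s.take p.toNat else s

def parse_field_values_alt (comments : List String) (field : String) : List String :=
  let pat := field.toList ++ [':']
  comments.foldl (fun values raw =>
    match bMatch pat field.toList.length (bHead raw) 0 0 with
    | some v => values ++ [String.ofList v]
    | none => values) []

-- ===== PRECONDITION & SPEC =====
def Spec_parse_field_values (comments : List String) (field : String) (out : List String) : Prop := out = parse_field_values_alt comments field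
instance (comments : List String) (field : String) (out : List String) : Decidable (Spec_parse_field_values comments field out) := by unfold Spec_parse_field_values; infer_instance

-- ===== CLAIM (what is proved, stated in full; the proofs are below) =====
def Claim_equal_parse_field_values : Prop := ∀ (comments : List String) (field : String), Dom_parse_field_values comments field → Spec_parse_field_values comments field (parse_field_values comments field)

-- ===== LEMMAS AND PROOFS =====

lemma takeWhile_length_le (p : Char → Bool) (l : List Char) : (l.takeWhile p).length ≤ l.length := by
  induction l with
  | nil => simp
  | cons a t ih => by_cases h : p a <;> simp [h]
                   omega

lemma find_eq_zero_of_startswith (cs field : List Char)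
    (h : PySem.Chars.startswith cs field = true) : PySem.Chars.find cs field = 0 := by
  have hpre := (PySem.Chars.startswith_iff cs field).mp h
  have h0 : (0:Int) ≤ PySem.Chars.find cs field :=
    (PySem.Chars.find_nonneg_iff cs field).mpr hpre.isInfix
  have hspec := PySem.Chars.find_spec (s := cs) (sub := field) h0
  by_contra hne
  have hpos : 0 < (PySem.Chars.find cs field).toNat := by omega
  exact hspec.2 0 hpos (by simpa using hpre)

lemma aSkipWs_natCast (cs : List Char) (q : Nat) :
    aSkipWs cs (q : Int) = ((q + ((cs.drop q).takeWhile PySem.Chars.isspace).length : Nat) : Int) := by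
  by_cases hlt : q < cs.length
  · rw [aSkipWs]
    have hget : PySem.List.pyGet? cs (q : Int) = some cs[q] := by
      simp [pysem, hlt]
    have hdrop : cs.drop q = cs[q] :: cs.drop (q + 1) := List.drop_eq_getElem_cons hlt
    rw [if_pos (by exact_mod_cast hlt), hget]
    dsimp only
    by_cases hsp : PySem.Chars.isspace cs[q]
    · rw [if_pos hsp]
      rw [show (q:Int) + 1 = ((q+1 : Nat) : Int) by push_cast; ring]
      rw [aSkipWs_natCast cs (q + 1), hdrop]
      simp only [List.takeWhile_cons, hsp, if_true, List.length_cons]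
      push_cast
      ring
    · rw [if_neg hsp, hdrop]
      simp [hsp]
  · rw [aSkipWs, if_neg (by exact_mod_cast hlt)]
    rw [List.drop_eq_nil_of_le (by omega)]
    simp
termination_by cs.length - q
decreasing_by omega

-- phase 2 of B's scan (pattern position at the colon): skip whitespace, then demand ':'
lemma bMatch_phase2 (field body : List Char) (i : Nat) :
    bMatch (field ++ [':']) field.length body i field.length =
      match body.drop (i + ((body.drop i).takeWhile PySem.Chars.isspace).length) with
      | ':' :: rest => some (PySem.Chars.strip rest)
      | _ => none := by
  by_cases hlt : i < body.length
  · have hdrop : body.drop i = body[i] :: body.drop (i + 1) := List.drop_eq_getElem_cons hlt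
    rw [bMatch, dif_pos hlt]
    have hgetb : body.getD i ' ' = body[i] := List.getD_eq_getElem body ' ' hlt
    have hgetp : (field ++ [':']).getD field.length ' ' = ':' := by
      simp
    have hjlt : field.length < (field ++ [':']).length := by simp
    by_cases hcol : body[i] = ':'
    · have hspc : PySem.Chars.isspace ':' = false := by decide
      rw [if_pos ⟨hjlt, by rw [hgetb, hgetp, hcol]⟩, if_pos (by simp)]
      simp [hdrop, hcol, hspc]
    · by_cases hsp : PySem.Chars.isspace body[i]
      · rw [if_neg (by rw [hgetb, hgetp]; exact fun h => hcol h.2),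
            if_pos ⟨rfl, by rw [hgetb]; exact hsp⟩]
        rw [bMatch_phase2 field body (i + 1)]
        have harith : ∀ L : Nat, i + 1 + L = i + (L + 1) := by omega
        rw [hdrop]
        simp only [List.takeWhile_cons, hsp, if_true, List.length_cons, harith]
      · rw [if_neg (by rw [hgetb, hgetp]; exact fun h => hcol h.2),
            if_neg (by rw [hgetb]; exact fun h => hsp h.2)]
        rw [hdrop]
        simp only [List.takeWhile_cons, hsp, Bool.false_eq_true, if_false,
          List.length_nil, Nat.add_zero]
        rw [hdrop]
        split
        · next heq => injection heq with h1 _; exact absurd h1 hcol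
        · rfl
  · rw [bMatch, dif_neg hlt]
    have hnil : body.drop i = [] := List.drop_eq_nil_of_le (by omega)
    simp [hnil]
termination_by body.length - i
decreasing_by omega

-- phase 1 of B's scan: while the pattern position is inside the field, the scan
-- succeeds iff the remaining field characters prefix the remaining body
lemma bMatch_phase1 (field body : List Char) (i j : Nat) (hj : j ≤ field.length) :
    bMatch (field ++ [':']) field.length body i j =
      if field.drop j <+: body.drop i then
        bMatch (field ++ [':']) field.length body (i + (field.length - j)) field.length
      else none := by
  rcases Nat.eq_or_lt_of_le hj with heq | hlt
  · subst heq
    simp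
  · have hfd : field.drop j = field[j] :: field.drop (j + 1) := List.drop_eq_getElem_cons hlt
    by_cases hib : i < body.length
    · have hbd : body.drop i = body[i] :: body.drop (i + 1) := List.drop_eq_getElem_cons hib
      rw [bMatch, dif_pos hib]
      have hgetb : body.getD i ' ' = body[i] := List.getD_eq_getElem body ' ' hib
      have hgetp : (field ++ [':']).getD j ' ' = field[j] := by
        rw [List.getD_append _ _ _ _ hlt]
        exact List.getD_eq_getElem field ' ' hlt
      have hjlt : j < (field ++ [':']).length := by simp; omega
      by_cases hc : body[i] = field[j]
      · rw [if_pos ⟨hjlt, by rw [hgetb, hgetp, hc]⟩,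
            if_neg (by simp; omega)]
        rw [bMatch_phase1 field body (i + 1) (j + 1) hlt]
        have hpre : (field.drop j <+: body.drop i) ↔ (field.drop (j+1) <+: body.drop (i+1)) := by
          rw [hfd, hbd, hc, List.cons_prefix_cons]
          simp
        have harith : i + 1 + (field.length - (j + 1)) = i + (field.length - j) := by omega
        rw [harith]
        by_cases hp : field.drop (j+1) <+: body.drop (i+1)
        · rw [if_pos hp, if_pos (hpre.mpr hp)]
        · rw [if_neg hp, if_neg (fun h => hp (hpre.mp h))]
      · have hnpre : ¬ field.drop j <+: body.drop i := by
          rw [hfd, hbd, List.cons_prefix_cons]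
          exact fun h => hc h.1.symm
        rw [if_neg (by rw [hgetb, hgetp]; exact fun h => hc h.2),
            if_neg (by exact fun h => absurd h.1 (by omega)),
            if_neg hnpre]
    · rw [bMatch, dif_neg hib]
      have hnil : body.drop i = [] := List.drop_eq_nil_of_le (by omega)
      have hnp : ¬ field.drop j <+: body.drop i := by
        rw [hnil, hfd]
        exact fun h => List.cons_ne_nil _ _ (List.prefix_nil.mp h)
      rw [if_neg hnp]
termination_by field.length - j
decreasing_by omega

-- the two per-comment step functions agree (on the same truncated body cs)
lemma step_eq (field : List Char) (values : List String) (cmnt : String) :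
    parseFieldStep field values cmnt =
      (match bMatch (field ++ [':']) field.length (bHead cmnt) 0 0 with
       | some v => values ++ [String.ofList v]
       | none => values) := by
  simp only [parseFieldStep, bHead]
  rw [show ∀ p : Int, (if p ≥ 0 then PySem.List.slice (PySem.Chars.strip cmnt.toList) none (some p)
        else PySem.Chars.strip cmnt.toList)
      = (if p ≥ 0 then (PySem.Chars.strip cmnt.toList).take p.toNat
        else PySem.Chars.strip cmnt.toList) from fun p => by
      by_cases hp : p ≥ 0
      · rw [if_pos hp, if_pos hp, PySem.List.slice_to _ hp]
      · rw [if_neg hp, if_neg hp]]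
  set cs := (if PySem.Chars.find (PySem.Chars.strip cmnt.toList) "###".toList ≥ 0 then
      (PySem.Chars.strip cmnt.toList).take (PySem.Chars.find (PySem.Chars.strip cmnt.toList) "###".toList).toNat
    else PySem.Chars.strip cmnt.toList) with hcs
  rw [bMatch_phase1 field cs 0 0 (by omega)]
  simp only [List.drop_zero, Nat.sub_zero, Nat.zero_add]
  by_cases hstart : PySem.Chars.startswith cs field = true
  · have hpre : field <+: cs := (PySem.Chars.startswith_iff cs field).mp hstart
    rw [if_pos hstart, if_pos hpre, bMatch_phase2 field cs field.length]
    rw [find_eq_zero_of_startswith cs field hstart]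
    rw [show (0:Int) + (field.length : Int) = ((field.length : Nat) : Int) by ring]
    rw [aSkipWs_natCast cs field.length]
    set t := ((cs.drop field.length).takeWhile PySem.Chars.isspace).length with ht
    set k := field.length + t with hkdef
    have hfl : field.length ≤ cs.length := hpre.length_le
    have ht_le : t ≤ (cs.drop field.length).length := by
      rw [ht]; exact takeWhile_length_le _ _
    have hk_le : k ≤ cs.length := by
      simp at ht_le; omega
    by_cases hkend : k = cs.length
    · rw [if_pos (show ((k : Nat) : Int) = (cs.length : Int) from by exact_mod_cast hkend)]
      rw [List.drop_eq_nil_of_le (show cs.length ≤ k from by omega)]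
    · have hklt : k < cs.length := by omega
      rw [if_neg (show ¬ ((k : Nat) : Int) = (cs.length : Int) from by exact_mod_cast hkend)]
      have hget : PySem.List.pyGet? cs ((k : Nat) : Int) = some cs[k] := by
        simp [pysem, hklt]
      have hdropk : cs.drop k = cs[k] :: cs.drop (k + 1) := List.drop_eq_getElem_cons hklt
      by_cases hcol : cs[k] = ':'
      · rw [if_neg (show ¬ (PySem.List.pyGet? cs ((k : Nat) : Int) ≠ some ':') from by
            simp [hget, hcol])]
        rw [show ((k : Nat) : Int) + 1 = ((k + 1 : Nat) : Int) from by push_cast; ring]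
        rw [PySem.List.slice_from_natCast, hdropk, hcol]
        rfl
      · rw [if_pos (show PySem.List.pyGet? cs ((k : Nat) : Int) ≠ some ':' from by
            simp [hget, hcol])]
        rw [hdropk]
        have hin : (match cs[k] :: List.drop (k + 1) cs with
            | ':' :: rest => some (PySem.Chars.strip rest)
            | _ => none) = none := by
          split
          · next h => injection h with h1 _; exact absurd h1 hcol
          · rfl
        rw [hin]
  · rw [if_neg hstart,
        if_neg (fun h => hstart ((PySem.Chars.startswith_iff cs field).mpr h))]

lemma foldl_eq (field : List Char) (l : List String) (values : List String) :
    l.foldl (parseFieldStep field) values =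
      l.foldl (fun values raw =>
        match bMatch (field ++ [':']) field.length (bHead raw) 0 0 with
        | some v => values ++ [String.ofList v]
        | none => values) values := by
  induction l generalizing values with
  | nil => rfl
  | cons c t ih => simp only [List.foldl_cons, step_eq, ih]

-- ===== VERDICT (by name: the statement is the Claim_ definition above) =====
theorem parse_field_values_spec : Claim_equal_parse_field_values := by
  intro comments field _
  unfold Spec_parse_field_values parse_field_values parse_field_values_alt
  exact foldl_eq field.toList comments []
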